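-- pv_equiv track=rewrite | github.com/choco9966/Algorithm-Master | programmers/코딩테스트 대비반/1주차/게임아이템.py | solution
-- ===== SOURCE A (Python) =====
-- def solution(healths, items):
--     '''
--     정답은 맞았지만 시간초과한 코드
--     '''
--     answer = []
--     healths = sorted(healths)
--
--     items_ = []
--     for idx, item in enumerate(items):
--         items_.append((idx+1, item[0], item[1]))
--
--     items = sorted(items_, key = lambda x: -x[1])
--     for item in items:
--         for idx, health in enumerate(healths):
--             if health - item[2] >= 100:
--                 answer.append(item[0])
--                 if idx != (len(healths) -1):
--                     healths = healths[0:idx] + healths[idx+1:]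
--                     break
--                 else:
--                     healths.pop()
--     return sorted(answer)
-- ===== SOURCE B (Python) =====
-- def solution(healths, items):
--     hs = sorted(healths)
--     its = sorted([(i + 1, it[0], it[1]) for i, it in enumerate(items)],
--                  key=lambda t: -t[1])
--     ans = []
--     for num, _atk, dbf in its:
--         need = dbf + 100
--         lo, hi = 0, len(hs)
--         while lo < hi:
--             mid = (lo + hi) // 2
--             if hs[mid] < need:
--                 lo = mid + 1
--             else:
--                 hi = mid
--         if lo < len(hs):
--             del hs[lo]
--             ans.append(num)
--     return sorted(ans)
-- ===== Notes on version B (the rewrite author's own statement) =====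
-- stated objective: faster
-- what changed: B replaces A's per-item linear scan over the sorted healths (and list rebuilding by slicing) with a hand-rolled binary search for the smallest qualifying health followed by a single deletion.
-- outside the precondition, e.g. on solution([100], [[1]]): A raises IndexError, B raises IndexError
import Mathlib
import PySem

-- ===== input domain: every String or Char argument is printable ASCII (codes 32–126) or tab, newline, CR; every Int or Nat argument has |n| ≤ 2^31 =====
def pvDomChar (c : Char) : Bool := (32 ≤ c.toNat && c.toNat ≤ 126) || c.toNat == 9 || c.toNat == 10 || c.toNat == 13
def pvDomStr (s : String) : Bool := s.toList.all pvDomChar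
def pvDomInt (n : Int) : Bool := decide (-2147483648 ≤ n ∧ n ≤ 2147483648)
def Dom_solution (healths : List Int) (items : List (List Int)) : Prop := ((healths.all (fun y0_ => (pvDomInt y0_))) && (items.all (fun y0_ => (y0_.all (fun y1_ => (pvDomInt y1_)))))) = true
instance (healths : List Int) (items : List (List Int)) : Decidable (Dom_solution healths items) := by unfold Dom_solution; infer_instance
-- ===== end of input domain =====

-- B replaces A's per-item linear scan over the sorted healths (and list rebuilding by
-- slicing) with a binary search for the smallest qualifying health and a single deletion.

-- ===== PORT A =====
-- inner 'for idx, health in enumerate(healths): if health - d >= 100: … break' —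
-- first index whose health satisfies the condition (the loop breaks / ends there)
def pvScanA (d : Int) : List Int → Nat → Option Nat
  | [], _ => none
  | h :: t, i => if h - d ≥ 100 then some i else pvScanA d t (i + 1)

-- one iteration of A's outer loop over (id, attack, debuff); state = (answer, healths)
def pvStepA (st : List Int × List Int) (item : Int × Int × Int) : List Int × List Int :=
  match pvScanA item.2.2 st.2 0 with
  | none => st
  | some idx =>
      (st.1 ++ [item.1],
       if idx ≠ st.2.length - 1 then
         -- healths[0:idx] + healths[idx+1:]
         PySem.List.slice st.2 (some (0 : Int)) (some ((idx : Nat) : Int)) ++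
           PySem.List.slice st.2 (some (((idx : Nat) : Int) + 1)) none
       else st.2.dropLast)   -- healths.pop(): drops the last element (list nonempty here)

-- item[0] / item[1] ported as getD: exact for items of length ≥ 2 (Pre_solution)
def solution (healths : List Int) (items : List (List Int)) : List Int :=
  PySem.List.sorted
    (((PySem.List.sorted
          ((PySem.List.enumerate items 0).map (fun p => (p.1 + 1, p.2.getD 0 0, p.2.getD 1 0)))
          (fun t => -t.2.1)).foldl pvStepA
        ([], PySem.List.sorted healths (fun x => x))).1)
    (fun x => x)

-- ===== PORT B =====
-- hand-rolled 'while lo < hi' binary search of Source B (leftmost hs[j] >= need)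
def pvBS (hs : List Int) (need : Int) (lo hi : Nat) : Nat :=
  if h : lo < hi then
    let mid := (lo + hi) / 2
    if hs.getD mid 0 < need then pvBS hs need (mid + 1) hi else pvBS hs need lo mid
  else lo
termination_by hi - lo
decreasing_by all_goals omega

-- one iteration of Source B's loop; state = (ans, hs)
def pvStepB (st : List Int × List Int) (item : Int × Int × Int) : List Int × List Int :=
  let need := item.2.2 + 100
  let lo := pvBS st.2 need 0 st.2.length
  if lo < st.2.length then (st.1 ++ [item.1], st.2.eraseIdx lo) else st

def solution_alt (healths : List Int) (items : List (List Int)) : List Int :=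
  PySem.List.sorted
    (((PySem.List.sorted
          ((PySem.List.enumerate items 0).map (fun p => (p.1 + 1, p.2.getD 0 0, p.2.getD 1 0)))
          (fun t => -t.2.1)).foldl pvStepB
        ([], PySem.List.sorted healths (fun x => x))).1)
    (fun x => x)

-- ===== PRECONDITION & SPEC =====
-- A does items[i][0] and items[i][1] on every item: an item shorter than 2 raises IndexError
def Pre_solution (healths : List Int) (items : List (List Int)) : Prop :=
  ∀ it ∈ items, 2 ≤ it.length
instance (healths : List Int) (items : List (List Int)) : Decidable (Pre_solution healths items) := by unfold Pre_solution; infer_instance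

def pvWitness_solution : List Int × List (List Int) := ([200, 150], [[5, 100], [3, 40]])

def Spec_solution (healths : List Int) (items : List (List Int)) (out : List Int) : Prop := out = solution_alt healths items
instance (healths : List Int) (items : List (List Int)) (out : List Int) : Decidable (Spec_solution healths items out) := by unfold Spec_solution; infer_instance

-- ===== CLAIM (what is proved, stated in full; the proofs are below) =====
def Claim_equal_solution : Prop := ∀ (healths : List Int) (items : List (List Int)), Dom_solution healths items → Pre_solution healths items → Spec_solution healths items (solution healths items)

-- ===== LEMMAS AND PROOFS =====

-- binary-search invariant: everything below the result fails, the result (if in range) succeeds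
theorem pvBS_spec (hs : List Int) (need : Int) (lo hi : Nat)
    (hmono : ∀ i j : Nat, i ≤ j → j < hs.length → hs.getD i 0 ≤ hs.getD j 0)
    (hhi : hi ≤ hs.length) (hlohi : lo ≤ hi)
    (hlow : ∀ i : Nat, i < lo → hs.getD i 0 < need)
    (hup : ∀ i : Nat, hi ≤ i → i < hs.length → need ≤ hs.getD i 0) :
    (∀ i : Nat, i < pvBS hs need lo hi → hs.getD i 0 < need) ∧
      (pvBS hs need lo hi < hs.length → need ≤ hs.getD (pvBS hs need lo hi) 0) ∧
      pvBS hs need lo hi ≤ hs.length := by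
  induction lo, hi using pvBS.induct hs need with
  | case1 lo hi h mid hlt ih =>
      have hmid : mid = (lo + hi) / 2 := rfl
      rw [pvBS, dif_pos h]
      simp only [← hmid]
      rw [if_pos hlt]
      exact ih (by omega) (by omega)
        (fun i hi' => lt_of_le_of_lt (hmono i mid (by omega) (by omega)) hlt) hup
  | case2 lo hi h mid hlt ih =>
      have hmid : mid = (lo + hi) / 2 := rfl
      rw [pvBS, dif_pos h]
      simp only [← hmid]
      rw [if_neg hlt]
      exact ih (by omega) (by omega) hlow
        (fun i hmi hil => le_trans (not_lt.mp hlt) (hmono mid i hmi hil))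
  | case3 lo hi h =>
      rw [pvBS, dif_neg h]
      exact ⟨hlow, fun hl => hup lo (by omega) hl, by omega⟩

-- A's linear scan finds exactly the index r characterised by the binary-search invariant
theorem pvScanA_spec (d : Int) (hs : List Int) (r k : Nat)
    (hr : r ≤ hs.length)
    (hlow : ∀ i : Nat, i < r → hs.getD i 0 < d + 100)
    (hhit : r < hs.length → d + 100 ≤ hs.getD r 0) :
    pvScanA d hs k = if r < hs.length then some (k + r) else none := by
  induction hs generalizing r k with
  | nil => simp [pvScanA]
  | cons h t ih =>
      by_cases hc : h - d ≥ 100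
      · have hr0 : r = 0 := by
          by_contra hne
          have := hlow 0 (by omega)
          simp at this; omega
        subst hr0
        simp [pvScanA, hc]
      · have hr0 : r ≠ 0 := by
          intro h0; subst h0
          have := hhit (by simp)
          simp at this; omega
        obtain ⟨r', rfl⟩ : ∃ r', r = r' + 1 := ⟨r - 1, by omega⟩
        have hrec := ih r' (k + 1)
          (by simp only [List.length_cons] at hr; omega)
          (fun i hi' => by simpa using hlow (i + 1) (by omega))
          (fun hl => by
            have := hhit (by simp only [List.length_cons]; omega)
            simpa using this)
        simp only [pvScanA, if_neg hc, hrec, List.length_cons]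
        by_cases hr' : r' < t.length <;> simp [hr'] <;> omega

-- Pairwise ≤ gives the getD-monotonicity pvBS_spec needs
theorem pairwise_getD_mono (hs : List Int) (h : hs.Pairwise (· ≤ ·)) :
    ∀ i j : Nat, i ≤ j → j < hs.length → hs.getD i 0 ≤ hs.getD j 0 := by
  intro i j hij hj
  rcases lt_or_eq_of_le hij with hlt | rfl
  · have := (List.pairwise_iff_getElem.mp h) i j (by omega) hj hlt
    rwa [List.getD_eq_getElem hs 0 (by omega), List.getD_eq_getElem hs 0 hj]
  · exact le_refl _

-- on a sorted healths list, one step of A equals one step of B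
theorem step_eq (ans hs : List Int) (item : Int × Int × Int)
    (h : hs.Pairwise (· ≤ ·)) :
    pvStepA (ans, hs) item = pvStepB (ans, hs) item := by
  have hmono := pairwise_getD_mono hs h
  obtain ⟨hlow, hhit, hle⟩ := pvBS_spec hs (item.2.2 + 100) 0 hs.length hmono
    (le_refl _) (by omega) (by omega) (by omega)
  set r := pvBS hs (item.2.2 + 100) 0 hs.length with hrdef
  have hscan := pvScanA_spec item.2.2 hs r 0 hle hlow hhit
  simp only [Nat.zero_add] at hscan
  by_cases hrl : r < hs.length
  · rw [if_pos hrl] at hscan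
    simp only [pvStepA, pvStepB, hscan, ← hrdef, if_pos hrl]
    congr 1
    rw [List.eraseIdx_eq_take_drop_succ]
    by_cases hlast : r = hs.length - 1
    · rw [if_neg (by omega)]
      rw [List.dropLast_eq_take, hlast]
      have hnil : hs.drop (hs.length - 1 + 1) = [] := List.drop_eq_nil_of_le (by omega)
      rw [hnil, List.append_nil]
    · rw [if_pos (by omega)]
      have hcast : (((r : Nat) : Int) + 1) = (((r + 1 : Nat) : Int)) := by push_cast; ring
      rw [hcast, PySem.List.slice_from_natCast, PySem.List.slice_zero_start,
        PySem.List.slice_to_natCast]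
  · rw [if_neg hrl] at hscan
    simp only [pvStepA, pvStepB, hscan, ← hrdef, if_neg hrl]

-- B's step preserves sortedness of the healths state
theorem stepB_sorted (ans hs : List Int) (item : Int × Int × Int)
    (h : hs.Pairwise (· ≤ ·)) : (pvStepB (ans, hs) item).2.Pairwise (· ≤ ·) := by
  simp only [pvStepB]
  split
  · exact h.sublist (List.eraseIdx_sublist hs _)
  · exact h

-- the two folds coincide from any equal, sorted state
theorem fold_eq (its : List (Int × Int × Int)) (ans hs : List Int)
    (h : hs.Pairwise (· ≤ ·)) :
    its.foldl pvStepA (ans, hs) = its.foldl pvStepB (ans, hs) := by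
  induction its generalizing ans hs with
  | nil => rfl
  | cons it rest ih =>
      simp only [List.foldl_cons, step_eq ans hs it h]
      have hs' := stepB_sorted ans hs it h
      cases hp : pvStepB (ans, hs) it with
      | mk a2 h2 =>
          exact ih a2 h2 (by rw [hp] at hs'; exact hs')

-- ===== VERDICT (by name: the statement is the Claim_ definition above) =====
theorem solution_spec : Claim_equal_solution := by
  intro healths items _hdom _hpre
  unfold Spec_solution solution solution_alt
  rw [fold_eq _ _ _ (by
    simpa using PySem.List.sorted_pairwise healths (fun x : Int => x))]
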